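-- pv_equiv track=rewrite | github.com/yellowcooln/meshcore-gui-serial | meshcore_gui/services/route_builder.py | _find_contact_by_adv_name
-- ===== SOURCE A (Python) =====
-- from typing import Dict, List, Optional
--
-- def _find_contact_by_adv_name(
--     name: str, contacts: Dict,
-- ) -> Optional[tuple]:
--     """Find a contact by advertised name (case-insensitive).
--
--     Mirrors the matching logic of
--     :meth:`SharedData.get_contact_by_name` but operates on the
--     snapshot contacts dict directly.
--
--     Args:
--         name:     Display name to search for.
--         contacts: Contact dict from snapshot.
--
--     Returns:
--         ``(pubkey, contact_dict)`` tuple or ``None``.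
--     """
--     if not name:
--         return None
--     name_lower = name.lower()
--     # Exact match first
--     for key, contact in contacts.items():
--         if contact.get('adv_name', '') == name:
--             return (key, contact)
--     # Case-insensitive fallback
--     for key, contact in contacts.items():
--         if contact.get('adv_name', '').lower() == name_lower:
--             return (key, contact)
--     return None
-- ===== SOURCE B (Python) =====
-- def _find_contact_by_adv_name(name, contacts):
--     if not name:
--         return None
--     name_lower = name.lower()
--     cand = None
--     for key, contact in contacts.items():
--         adv = contact.get('adv_name', '')
--         if adv == name:
--             return (key, contact)
--         if cand is None and adv.lower() == name_lower:
--             cand = (key, contact)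
--     return cand
-- ===== Notes on version B (the rewrite author's own statement) =====
-- stated objective: alternative
-- what changed: Single pass that returns on the first exact match and remembers the first case-insensitive candidate, instead of two full scans over contacts.
import Mathlib
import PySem

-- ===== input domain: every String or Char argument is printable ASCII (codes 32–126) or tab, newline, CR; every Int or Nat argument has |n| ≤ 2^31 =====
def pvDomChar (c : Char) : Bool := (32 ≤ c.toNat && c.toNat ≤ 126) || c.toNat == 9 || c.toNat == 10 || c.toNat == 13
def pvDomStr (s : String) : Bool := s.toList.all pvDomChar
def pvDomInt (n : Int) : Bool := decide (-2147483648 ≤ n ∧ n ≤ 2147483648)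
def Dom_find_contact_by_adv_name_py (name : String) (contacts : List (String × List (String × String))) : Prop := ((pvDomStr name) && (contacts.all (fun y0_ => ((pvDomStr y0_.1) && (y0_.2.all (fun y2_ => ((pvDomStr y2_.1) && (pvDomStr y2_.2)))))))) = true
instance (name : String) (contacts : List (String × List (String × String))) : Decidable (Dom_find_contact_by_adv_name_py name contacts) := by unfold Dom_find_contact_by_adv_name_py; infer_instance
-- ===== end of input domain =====

-- B replaces A's two scans with a single pass (exact match returns immediately; first case-insensitive match is remembered): same result by a different traversal.


-- ===== PORT A =====
-- A: two passes — exact match first, then case-insensitive fallback.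
def pvALoop1 (name : String) : List (String × List (String × String)) → Option (String × (List (String × String)))
  | [] => none
  | (key, contact) :: rest =>
    if PySem.Dict.getD (PySem.Dict.mk contact) "adv_name" "" = name then some (key, contact)
    else pvALoop1 name rest

def pvALoop2 (nameLower : String) : List (String × List (String × String)) → Option (String × (List (String × String)))
  | [] => none
  | (key, contact) :: rest =>
    if PySem.Str.lower (PySem.Dict.getD (PySem.Dict.mk contact) "adv_name" "") = nameLower then some (key, contact)
    else pvALoop2 nameLower rest

def find_contact_by_adv_name_py (name : String) (contacts : List (String × List (String × String))) : Option (String × (List (String × String))) :=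
  if name = "" then none
  else
    let nameLower := PySem.Str.lower name
    match pvALoop1 name contacts with
    | some r => some r
    | none => pvALoop2 nameLower contacts

-- ===== PORT B =====
-- B: one pass; return on exact match, remember the first case-insensitive candidate.
def pvBLoop (name nameLower : String) (cand : Option (String × (List (String × String)))) : List (String × List (String × String)) → Option (String × (List (String × String)))
  | [] => cand
  | (key, contact) :: rest =>
    let adv := PySem.Dict.getD (PySem.Dict.mk contact) "adv_name" ""
    if adv = name then some (key, contact)
    else if cand = none ∧ PySem.Str.lower adv = nameLower then
      pvBLoop name nameLower (some (key, contact)) rest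
    else pvBLoop name nameLower cand rest

def find_contact_by_adv_name_py_alt (name : String) (contacts : List (String × List (String × String))) : Option (String × (List (String × String))) :=
  if name = "" then none
  else pvBLoop name (PySem.Str.lower name) none contacts

-- ===== PRECONDITION & SPEC =====
def Spec_find_contact_by_adv_name_py (name : String) (contacts : List (String × List (String × String))) (out : Option (String × (List (String × String)))) : Prop := out = find_contact_by_adv_name_py_alt name contacts
instance (name : String) (contacts : List (String × List (String × String))) (out : Option (String × (List (String × String)))) : Decidable (Spec_find_contact_by_adv_name_py name contacts out) := by unfold Spec_find_contact_by_adv_name_py; infer_instance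

-- ===== CLAIM (what is proved, stated in full; the proofs are below) =====
def Claim_equal_find_contact_by_adv_name_py : Prop := ∀ (name : String) (contacts : List (String × List (String × String))), Dom_find_contact_by_adv_name_py name contacts → Spec_find_contact_by_adv_name_py name contacts (find_contact_by_adv_name_py name contacts)

-- ===== LEMMAS AND PROOFS =====
theorem pvBLoop_char (name nameLower : String) (cand : Option (String × (List (String × String)))) (l : List (String × List (String × String))) :
    pvBLoop name nameLower cand l =
      match pvALoop1 name l with
      | some r => some r
      | none => match cand with
        | some c => some c
        | none => pvALoop2 nameLower l := by
  induction l generalizing cand with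
  | nil => cases cand <;> simp [pvBLoop, pvALoop1, pvALoop2]
  | cons hd rest ih =>
    obtain ⟨key, contact⟩ := hd
    by_cases hx : PySem.Dict.getD (PySem.Dict.mk contact) "adv_name" "" = name
    · simp [pvBLoop, pvALoop1, hx]
    · by_cases hc : cand = none
      · subst hc
        by_cases hl : PySem.Str.lower (PySem.Dict.getD (PySem.Dict.mk contact) "adv_name" "") = nameLower
        · simp [pvBLoop, pvALoop1, pvALoop2, hx, hl, ih]
        · simp [pvBLoop, pvALoop1, pvALoop2, hx, hl, ih]
      · obtain ⟨c, rfl⟩ := Option.ne_none_iff_exists'.mp hc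
        simp [pvBLoop, pvALoop1, hx, ih]

-- ===== VERDICT (by name: the statement is the Claim_ definition above) =====
theorem find_contact_by_adv_name_py_spec : Claim_equal_find_contact_by_adv_name_py := by
  intro name contacts _
  unfold Spec_find_contact_by_adv_name_py find_contact_by_adv_name_py find_contact_by_adv_name_py_alt
  by_cases h : name = ""
  · simp [h]
  · simp only [h, if_false, pvBLoop_char]
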